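-- pv_equiv track=rewrite | github.com/vazrupe/okky-question | q1.py | get_gap_list
-- ===== SOURCE A (Python) =====
-- def get_gap_list(sorted_nums, gap):
--     max_check_num = sorted_nums[-1] - gap
--
--     for i in range(len(sorted_nums)):
--         this_num = sorted_nums[i]
--         if this_num > max_check_num:
--             return
--
--         target_num = this_num + gap
--         for j in range(i, len(sorted_nums)):
--             next_num = sorted_nums[j]
--             if target_num == next_num:
--                 yield (this_num, next_num)
--             elif target_num < next_num:
--                 break
-- ===== SOURCE B (Python) =====
-- def get_gap_list(sorted_nums, gap):
--     # Jump-table reformulation: precompute ngt[j] = first index k > j with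
--     # sorted_nums[k] > sorted_nums[j] (else n), then walk each suffix by jumps,
--     # skipping dominated stretches instead of rescanning them element by element.
--     n = len(sorted_nums)
--     last = sorted_nums[-1]
--     ngt = [n] * n
--     for j in range(n - 2, -1, -1):
--         k = j + 1
--         while k < n and sorted_nums[k] <= sorted_nums[j]:
--             k = ngt[k]
--         ngt[j] = k
--     for i in range(n):
--         v = sorted_nums[i]
--         if v > last - gap:
--             return
--         t = v + gap
--         j = i
--         while j < n and sorted_nums[j] <= t:
--             if sorted_nums[j] == t:
--                 yield (v, sorted_nums[j])
--                 j += 1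
--             else:
--                 j = ngt[j]
-- ===== Notes on version B (the rewrite author's own statement) =====
-- stated objective: alternative
-- what changed: Replaces A's per-element linear rescan by a precomputed next-strictly-greater jump table: each element's partner block is walked by pointer jumps that skip dominated stretches instead of rescanning them.
import Mathlib
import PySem

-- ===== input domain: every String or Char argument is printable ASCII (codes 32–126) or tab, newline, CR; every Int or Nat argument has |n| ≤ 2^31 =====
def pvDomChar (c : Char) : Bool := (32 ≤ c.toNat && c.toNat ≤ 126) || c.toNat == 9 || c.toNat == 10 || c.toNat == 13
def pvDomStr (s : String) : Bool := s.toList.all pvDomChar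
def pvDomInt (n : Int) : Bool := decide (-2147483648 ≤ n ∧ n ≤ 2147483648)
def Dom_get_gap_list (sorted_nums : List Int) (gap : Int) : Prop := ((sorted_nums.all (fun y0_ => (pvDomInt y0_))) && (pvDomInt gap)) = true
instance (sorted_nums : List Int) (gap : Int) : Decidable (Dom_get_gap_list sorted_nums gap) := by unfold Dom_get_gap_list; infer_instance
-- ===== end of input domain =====

-- B replaces A's per-element linear rescan by a precomputed next-strictly-greater
-- jump table walked by pointer jumps; equal output on every nonempty list.

-- ===== PORT A =====
-- inner 'for j in range(i, len(...))' loop: yield on equal, break on greater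
def pvAInner (xs : List Int) (target this_num : Int) (j : Nat) : List (Int × Int) :=
  if _h : j < xs.length then
    let next_num := xs.getD j 0
    if target = next_num then (this_num, next_num) :: pvAInner xs target this_num (j+1)
    else if target < next_num then []
    else pvAInner xs target this_num (j+1)
  else []
termination_by xs.length - j

-- outer 'for i in range(len(...))' loop with the early 'return'
def pvALoop (xs : List Int) (gap max_check_num : Int) (i : Nat) : List (Int × Int) :=
  if _h : i < xs.length then
    let this_num := xs.getD i 0
    if this_num > max_check_num then []
    else pvAInner xs (this_num + gap) this_num i ++ pvALoop xs gap max_check_num (i+1)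
  else []
termination_by xs.length - i

def get_gap_list (sorted_nums : List Int) (gap : Int) : List (Int × Int) :=
  match sorted_nums.getLast? with
  | none => []  -- Python raises IndexError on sorted_nums[-1]; excluded by Pre_
  | some last => pvALoop sorted_nums gap (last - gap) 0

-- ===== PORT B =====
-- 'while k < n and sorted_nums[k] <= sorted_nums[j]: k = ngt[k]' — the jump walk
-- that fills one ngt entry; 'suf' holds the already-filled entries for indices
-- ≥ base, and the explicit fuel (always ≥ n+1-k, proved below) only makes the
-- same computation total.
def pvNgtStep (xs : List Int) (xj : Int) (base : Nat) (suf : List Nat) : Nat → Nat → Nat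
  | 0, k => k
  | fuel+1, k =>
    if k < xs.length ∧ xs.getD k 0 ≤ xj then
      pvNgtStep xs xj base suf fuel (suf.getD (k - base) xs.length)
    else k

-- 'for j in range(n - 2, -1, -1)' building ngt back to front (entry n-1 stays n,
-- exactly as the Python initialiser leaves it)
def pvBuildNgt (xs : List Int) (j : Nat) : List Nat :=
  if _h : j < xs.length then
    let suf := pvBuildNgt xs (j+1)
    pvNgtStep xs (xs.getD j 0) (j+1) suf (xs.length + 1) (j+1) :: suf
  else []
termination_by xs.length - j

-- 'while j < n and sorted_nums[j] <= t' walk over the jump table (fueled likewise)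
def pvBWalk (xs : List Int) (t v : Int) (ngt : List Nat) : Nat → Nat → List (Int × Int)
  | 0, _ => []
  | fuel+1, j =>
    if j < xs.length ∧ xs.getD j 0 ≤ t then
      if xs.getD j 0 = t then (v, xs.getD j 0) :: pvBWalk xs t v ngt fuel (j+1)
      else pvBWalk xs t v ngt fuel (ngt.getD j xs.length)
    else []

-- 'for i in range(n)' with the early 'return'
def pvBLoop (xs : List Int) (gap last : Int) (ngt : List Nat) (i : Nat) : List (Int × Int) :=
  if _h : i < xs.length then
    let v := xs.getD i 0
    if v > last - gap then []
    else pvBWalk xs (v + gap) v ngt (xs.length + 1) i ++ pvBLoop xs gap last ngt (i+1)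
  else []
termination_by xs.length - i

def get_gap_list_alt (sorted_nums : List Int) (gap : Int) : List (Int × Int) :=
  match sorted_nums.getLast? with
  | none => []  -- Python raises IndexError on sorted_nums[-1]; excluded by Pre_
  | some last => pvBLoop sorted_nums gap last (pvBuildNgt sorted_nums 0) 0

-- ===== PRECONDITION & SPEC =====
-- Pre_ excludes only the empty list, on which both Pythons raise IndexError
-- (sorted_nums[-1]).
def Pre_get_gap_list (sorted_nums : List Int) (gap : Int) : Prop := sorted_nums ≠ []
instance (sorted_nums : List Int) (gap : Int) : Decidable (Pre_get_gap_list sorted_nums gap) := by unfold Pre_get_gap_list; infer_instance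

def pvWitness_get_gap_list : List Int × Int := ([3, 1, 2, 2, 4], 1)

def Spec_get_gap_list (sorted_nums : List Int) (gap : Int) (out : List (Int × Int)) : Prop := out = get_gap_list_alt sorted_nums gap
instance (sorted_nums : List Int) (gap : Int) (out : List (Int × Int)) : Decidable (Spec_get_gap_list sorted_nums gap out) := by unfold Spec_get_gap_list; infer_instance

-- ===== CLAIM (what is proved, stated in full; the proofs are below) =====
def Claim_equal_get_gap_list : Prop := ∀ (sorted_nums : List Int) (gap : Int), Dom_get_gap_list sorted_nums gap → Pre_get_gap_list sorted_nums gap → Spec_get_gap_list sorted_nums gap (get_gap_list sorted_nums gap)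

-- ===== LEMMAS AND PROOFS =====

-- m is the first index after j whose value exceeds xs.getD j 0 (or xs.length)
def pvFirstGt (xs : List Int) (j m : Nat) : Prop :=
  j < m ∧ m ≤ xs.length ∧ (∀ k, j < k → k < m → xs.getD k 0 ≤ xs.getD j 0) ∧
    (m < xs.length → xs.getD j 0 < xs.getD m 0)

-- the jump in pvNgtStep lands on the first strictly greater index
lemma pvNgtStep_spec (xs : List Int) (xj : Int) (base : Nat) (suf : List Nat)
    (hsuf : ∀ k, base ≤ k → k < xs.length → pvFirstGt xs k (suf.getD (k - base) xs.length)) :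
    ∀ fuel k, base ≤ k → k ≤ xs.length → xs.length + 1 ≤ fuel + k →
      k ≤ pvNgtStep xs xj base suf fuel k ∧ pvNgtStep xs xj base suf fuel k ≤ xs.length ∧
      (∀ l, k ≤ l → l < pvNgtStep xs xj base suf fuel k → xs.getD l 0 ≤ xj) ∧
      (pvNgtStep xs xj base suf fuel k < xs.length →
        xj < xs.getD (pvNgtStep xs xj base suf fuel k) 0) := by
  intro fuel
  induction fuel with
  | zero =>
    intro k hbk hkn hf
    have : ¬ k < xs.length := by omega
    rw [pvNgtStep]
    exact ⟨le_refl _, hkn, by intro l h1 h2; omega, by omega⟩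
  | succ fuel ih =>
    intro k hbk hkn hf
    rw [pvNgtStep]
    by_cases hc : k < xs.length ∧ xs.getD k 0 ≤ xj
    · simp only [if_pos hc]
      obtain ⟨g1, g2, g3, g4⟩ := hsuf k hbk hc.1
      obtain ⟨r1, r2, r3, r4⟩ := ih (suf.getD (k - base) xs.length) (by omega) g2 (by omega)
      refine ⟨by omega, r2, ?_, r4⟩
      intro l hl1 hl2
      rcases Nat.lt_or_ge l (suf.getD (k - base) xs.length) with h' | h'
      · rcases Nat.eq_or_lt_of_le hl1 with h'' | h''
        · rw [← h'']; exact hc.2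
        · exact le_trans (g3 l h'' h') hc.2
      · exact r3 l h' hl2
    · simp only [if_neg hc]
      exact ⟨le_refl _, hkn, by intro l h1 h2; omega, fun h => by
        rcases not_and_or.mp hc with h' | h'
        · omega
        · omega⟩

-- every entry of the built table is the first strictly greater index
lemma pvBuildNgt_spec (xs : List Int) :
    ∀ j, ((pvBuildNgt xs j).length = xs.length - j) ∧
      (∀ k, j ≤ k → k < xs.length → pvFirstGt xs k ((pvBuildNgt xs j).getD (k - j) xs.length)) := by
  intro j
  induction hd : xs.length - j using Nat.strong_induction_on generalizing j with
  | _ d ih =>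
    by_cases hj : j < xs.length
    · obtain ⟨ihl, ihp⟩ := ih (xs.length - (j+1)) (by omega) (j+1) rfl
      rw [pvBuildNgt]
      simp only [dif_pos hj]
      constructor
      · simp [ihl]; omega
      · intro k hk1 hk2
        rcases Nat.eq_or_lt_of_le hk1 with h' | h'
        · rw [← h']
          simp only [Nat.sub_self, List.getD_cons_zero]
          obtain ⟨r1, r2, r3, r4⟩ := pvNgtStep_spec xs (xs.getD j 0) (j+1) (pvBuildNgt xs (j+1))
            ihp (xs.length + 1) (j+1) (le_refl _) (by omega) (by omega)
          exact ⟨by omega, r2, fun l h1 h2 => r3 l (by omega) h2, r4⟩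
        · have : k - j = (k - (j+1)) + 1 := by omega
          rw [this, List.getD_cons_succ]
          exact ihp k (by omega) hk2
    · rw [pvBuildNgt]
      simp only [dif_neg hj]
      exact ⟨by simp; omega, by intro k h1 h2; omega⟩

-- A's scan ignores a stretch of values strictly below the target
lemma pvAInner_skip (xs : List Int) (target this_num : Int) :
    ∀ a b, a ≤ b → b ≤ xs.length → (∀ l, a ≤ l → l < b → xs.getD l 0 < target) →
      pvAInner xs target this_num a = pvAInner xs target this_num b := by
  intro a b
  induction hd : b - a using Nat.strong_induction_on generalizing a with
  | _ d ih =>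
    intro hab hbn hlow
    rcases Nat.eq_or_lt_of_le hab with h' | h'
    · rw [h']
    · have ha : a < xs.length := by omega
      have hlt := hlow a (le_refl _) h'
      rw [pvAInner]
      simp only [dif_pos ha]
      rw [if_neg (by omega), if_neg (by omega)]
      exact ih (b - (a+1)) (by omega) (a+1) rfl (by omega) hbn
        (fun l h1 h2 => hlow l (by omega) h2)

-- the jump walk produces exactly A's inner scan
lemma pvBWalk_eq (xs : List Int) (t v : Int) (ngt : List Nat)
    (hngt : ∀ k, k < xs.length → pvFirstGt xs k (ngt.getD k xs.length)) :
    ∀ fuel j, j ≤ xs.length → xs.length + 1 ≤ fuel + j →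
      pvBWalk xs t v ngt fuel j = pvAInner xs t v j := by
  intro fuel
  induction fuel with
  | zero =>
    intro j hj hf
    exact absurd hf (by omega)
  | succ fuel ih =>
    intro j hj hf
    rw [pvBWalk]
    by_cases hc : j < xs.length ∧ xs.getD j 0 ≤ t
    · simp only [if_pos hc]
      by_cases he : xs.getD j 0 = t
      · rw [if_pos he, ih (j+1) (by omega) (by omega)]
        conv_rhs => rw [pvAInner]
        simp only [dif_pos hc.1]
        rw [if_pos he.symm, he]
      · rw [if_neg he]
        obtain ⟨g1, g2, g3, g4⟩ := hngt j hc.1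
        rw [ih (ngt.getD j xs.length) g2 (by omega)]
        have h3 : xs.getD j 0 < t := lt_of_le_of_ne hc.2 he
        have hskip : pvAInner xs t v (j+1) = pvAInner xs t v (ngt.getD j xs.length) :=
          pvAInner_skip xs t v (j+1) (ngt.getD j xs.length) (by omega) g2
            (fun l h1 h2 => by
              have := g3 l (by omega) h2
              omega)
        rw [← hskip]
        conv_rhs => rw [pvAInner]
        simp only [dif_pos hc.1]
        rw [if_neg (fun h => he h.symm), if_neg (by omega)]
    · simp only [if_neg hc]
      rw [pvAInner]
      by_cases hjn : j < xs.length
      · have hgt : t < xs.getD j 0 := by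
          rcases not_and_or.mp hc with h' | h'
          · omega
          · omega
        simp only [dif_pos hjn]
        rw [if_neg (by omega), if_pos hgt]
      · simp [hjn]

-- the two outer loops agree step by step
lemma pvLoop_eq (xs : List Int) (gap last : Int) (ngt : List Nat)
    (hngt : ∀ k, k < xs.length → pvFirstGt xs k (ngt.getD k xs.length)) :
    ∀ i, pvALoop xs gap (last - gap) i = pvBLoop xs gap last ngt i := by
  intro i
  induction hd : xs.length - i using Nat.strong_induction_on generalizing i with
  | _ d ih =>
    rw [pvALoop, pvBLoop]
    by_cases hi : i < xs.length
    · simp only [dif_pos hi]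
      by_cases hgt : xs.getD i 0 > last - gap
      · rw [if_pos hgt, if_pos hgt]
      · rw [if_neg hgt, if_neg hgt,
          pvBWalk_eq xs (xs.getD i 0 + gap) (xs.getD i 0) ngt hngt (xs.length + 1) i
            (by omega) (by omega),
          ih (xs.length - (i+1)) (by omega) (i+1) rfl]
    · simp only [dif_neg hi]

-- ===== VERDICT (by name: the statement is the Claim_ definition above) =====
theorem get_gap_list_spec : Claim_equal_get_gap_list := by
  intro xs gap _ hne
  unfold Spec_get_gap_list get_gap_list get_gap_list_alt
  match hlast : xs.getLast? with
  | none => rfl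
  | some last =>
    exact pvLoop_eq xs gap last (pvBuildNgt xs 0)
      (fun k hk => by
        have := (pvBuildNgt_spec xs 0).2 k (Nat.zero_le _) hk
        simpa using this) 0
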